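-- pv_equiv track=rewrite | github.com/harishavenue1/harishavenue1.github.io | programs/replaceCharInplace/python_code.py | replaced_string_2
-- ===== SOURCE A (Python) =====
-- def replaced_string_2(s):
--     count = 1
--
--     # Python: List to collect results
--     result = []
--
--     # Python: Direct iteration over string characters
--     for c in s:
--         if c == 'o':
--
--             # Python: Generator expression with range() to create number sequence
--             result.append(''.join(str(i) for i in range(1, count + 1)))
--             count += 1
--         else:
--
--             # Python: .append() adds to list
--             result.append(c)
--
--     return ''.join(result)
-- ===== SOURCE B (Python) =====
-- def replaced_string_2(s):
--     # Split once on 'o'; between consecutive pieces insert a growing prefix "1", "12", "123", ...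
--     pieces = s.split('o')
--     out = [pieces[0]]
--     prefix = ''
--     k = 1
--     for piece in pieces[1:]:
--         prefix += str(k)
--         out.append(prefix)
--         out.append(piece)
--         k += 1
--     return ''.join(out)
-- ===== Notes on version B (the rewrite author's own statement) =====
-- stated objective: alternative
-- what changed: B splits the string once on the target character and interleaves the resulting pieces with a running prefix string extended by one number per gap, instead of A's per-character loop that rebuilds the whole number sequence with a fresh range/join at every occurrence.
import Mathlib
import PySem

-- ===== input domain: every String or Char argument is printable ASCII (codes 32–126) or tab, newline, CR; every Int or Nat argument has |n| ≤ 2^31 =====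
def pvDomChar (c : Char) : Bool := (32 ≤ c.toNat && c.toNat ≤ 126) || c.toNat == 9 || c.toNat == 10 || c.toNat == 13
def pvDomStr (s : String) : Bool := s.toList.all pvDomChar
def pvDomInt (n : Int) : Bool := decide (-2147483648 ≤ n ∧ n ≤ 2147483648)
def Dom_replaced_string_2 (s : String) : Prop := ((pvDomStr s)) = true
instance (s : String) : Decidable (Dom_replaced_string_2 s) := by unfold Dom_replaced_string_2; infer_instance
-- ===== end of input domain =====

-- B splits the string once on 'o' and interleaves the o-free pieces with a running prefix
-- extended by one number per gap, replacing A's per-character loop that regenerates the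
-- whole number sequence with a fresh range/join at every occurrence — an alternative algorithm.

-- ===== PORT A =====
-- state: (count, result); each 'o' appends ''.join(str(i) for i in range(1, count+1))
def replaced_string_2 (s : String) : String :=
  let st := s.toList.foldl
    (fun (st : Int × List String) c =>
      if c = 'o' then
        (st.1 + 1, st.2 ++ [PySem.Str.join "" ((PySem.List.pyRange 1 (st.1 + 1) 1).map PySem.Int.toStr)])
      else
        (st.1, st.2 ++ [String.ofList [c]]))
    (1, [])
  PySem.Str.join "" st.2

-- ===== PORT B =====
-- pieces = s.split('o'); out starts with pieces[0] (split never returns an empty list,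
-- so pieces[0] is ported as headD ""); the loop over pieces[1:] carries (k, prefix, out).
def replaced_string_2_alt (s : String) : String :=
  let pieces := (PySem.Chars.splitOn s.toList ['o']).map String.ofList
  let st := (pieces.drop 1).foldl
    (fun (st : Int × String × List String) piece =>
      let p := st.2.1 ++ PySem.Int.toStr st.1
      (st.1 + 1, p, st.2.2 ++ [p, piece]))
    (1, "", [pieces.headD ""])
  PySem.Str.join "" st.2.2

-- ===== PRECONDITION & SPEC =====
def Spec_replaced_string_2 (s : String) (out : String) : Prop := out = replaced_string_2_alt s
instance (s : String) (out : String) : Decidable (Spec_replaced_string_2 s out) := by unfold Spec_replaced_string_2; infer_instance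

-- ===== CLAIM (what is proved, stated in full; the proofs are below) =====
def Claim_equal_replaced_string_2 : Prop := ∀ (s : String), Dom_replaced_string_2 s → Spec_replaced_string_2 s (replaced_string_2 s)

-- ===== LEMMAS AND PROOFS =====

theorem pv_join_nil_eq_flatten : ∀ (l : List (List Char)), PySem.Chars.join [] l = l.flatten := by
  intro l
  induction l with
  | nil => simp [PySem.Chars.join_nil]
  | cons a t ih =>
    cases t with
    | nil => simp [PySem.Chars.join_singleton]
    | cons b r =>
      rw [PySem.Chars.join_cons_cons]
      simp only [List.flatten_cons] at ih ⊢
      rw [ih]; simp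

-- joined char content of a list of strings
def pvJ (l : List String) : List Char := (l.map String.toList).flatten

theorem pv_join_toList (l : List String) : (PySem.Str.join "" l).toList = pvJ l := by
  simp [PySem.Str.toList_join, pv_join_nil_eq_flatten, pvJ]

-- the string "12…(count-1)" that B's prefix holds when the counter is at count
def pvSeq (count : Int) : String :=
  PySem.Str.join "" ((PySem.List.pyRange 1 count 1).map PySem.Int.toStr)

theorem pvSeq_succ {count : Int} (h : 1 ≤ count) :
    pvSeq (count + 1) = pvSeq count ++ PySem.Int.toStr count := by
  unfold pvSeq
  rw [PySem.List.pyRange_one_succ_right h]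
  apply String.toList_injective
  simp [PySem.Str.toList_join, pv_join_nil_eq_flatten]

-- ---- a simple structural recursion computing split-on-'o': (first piece, later pieces) ----
def pvSplitO : List Char → List Char × List (List Char)
  | [] => ([], [])
  | c :: t =>
    let hr := pvSplitO t
    if c = 'o' then ([], hr.1 :: hr.2) else (c :: hr.1, hr.2)

theorem pv_go_eq : ∀ (cs : List Char) (fuel : Nat) (cur : List Char) (acc : List (List Char)),
    cs.length < fuel →
    PySem.Chars.splitOn.go ['o'] fuel cs cur acc
      = acc.reverse ++ (cur.reverse ++ (pvSplitO cs).1) :: (pvSplitO cs).2 := by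
  intro cs
  induction cs with
  | nil =>
    intro fuel cur acc h
    cases fuel with
    | zero => omega
    | succ m => simp [PySem.Chars.splitOn.go, pvSplitO]
  | cons c t ih =>
    intro fuel cur acc h
    cases fuel with
    | zero => omega
    | succ m =>
      by_cases hc : c = 'o'
      · subst hc
        have step : PySem.Chars.splitOn.go ['o'] (m+1) ('o'::t) cur acc
            = PySem.Chars.splitOn.go ['o'] m t [] (cur.reverse :: acc) := by
          simp [PySem.Chars.splitOn.go, List.isPrefixOf]
        rw [step, ih m [] (cur.reverse :: acc) (by simpa using h)]
        simp [pvSplitO]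
      · have step : PySem.Chars.splitOn.go ['o'] (m+1) (c::t) cur acc
            = PySem.Chars.splitOn.go ['o'] m t (c :: cur) acc := by
          simp [PySem.Chars.splitOn.go, List.isPrefixOf]
          intro hco; exact absurd hco.symm hc
        rw [step, ih m (c :: cur) acc (by simpa using h)]
        simp [pvSplitO, if_neg hc]


theorem pv_splitOn_eq (cs : List Char) :
    PySem.Chars.splitOn cs ['o'] = (pvSplitO cs).1 :: (pvSplitO cs).2 := by
  unfold PySem.Chars.splitOn
  rw [pv_go_eq cs (cs.length + 1) [] [] (by omega)]
  simp

-- ---- A's loop as a structural recursion producing the emitted strings ----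
def pvListA : List Char → Int → List String
  | [], _ => []
  | c :: t, n =>
    if c = 'o' then
      PySem.Str.join "" ((PySem.List.pyRange 1 (n + 1) 1).map PySem.Int.toStr) :: pvListA t (n + 1)
    else
      String.ofList [c] :: pvListA t n

theorem pv_foldlA : ∀ (cs : List Char) (n : Int) (res : List String),
    (cs.foldl
      (fun (st : Int × List String) c =>
        if c = 'o' then
          (st.1 + 1, st.2 ++ [PySem.Str.join "" ((PySem.List.pyRange 1 (st.1 + 1) 1).map PySem.Int.toStr)])
        else
          (st.1, st.2 ++ [String.ofList [c]]))
      (n, res)).2 = res ++ pvListA cs n := by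
  intro cs
  induction cs with
  | nil => intro n res; simp [pvListA]
  | cons c t ih =>
    intro n res
    by_cases hc : c = 'o'
    · simp only [List.foldl_cons, hc]
      rw [ih]; simp [pvListA]
    · simp only [List.foldl_cons, if_neg hc]
      rw [ih]; simp [pvListA, if_neg hc]

-- ---- B's loop as a structural recursion producing the emitted strings ----
def pvListB : List String → Int → String → List String
  | [], _, _ => []
  | piece :: rest, n, p =>
    (p ++ PySem.Int.toStr n) :: piece :: pvListB rest (n + 1) (p ++ PySem.Int.toStr n)

theorem pv_foldlB : ∀ (ps : List String) (n : Int) (p : String) (out : List String),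
    (ps.foldl
      (fun (st : Int × String × List String) piece =>
        let q := st.2.1 ++ PySem.Int.toStr st.1
        (st.1 + 1, q, st.2.2 ++ [q, piece]))
      (n, p, out)).2.2 = out ++ pvListB ps n p := by
  intro ps
  induction ps with
  | nil => intro n p out; simp [pvListB]
  | cons piece rest ih =>
    intro n p out
    simp only [List.foldl_cons]
    rw [ih]; simp [pvListB]

-- ---- glue: A's emitted characters = first piece ++ B's emitted characters ----
theorem pv_glue : ∀ (cs : List Char) (n : Int) (p : String), 1 ≤ n → p = pvSeq n →
    pvJ (pvListA cs n)
      = (pvSplitO cs).1 ++ pvJ (pvListB ((pvSplitO cs).2.map String.ofList) n p) := by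
  intro cs
  induction cs with
  | nil => intro n p h hp; simp [pvListA, pvSplitO, pvListB, pvJ]
  | cons c t ih =>
    intro n p h hp
    by_cases hc : c = 'o'
    · subst hc
      have hemit : PySem.Str.join "" ((PySem.List.pyRange 1 (n + 1) 1).map PySem.Int.toStr)
          = p ++ PySem.Int.toStr n := by
        rw [hp, ← pvSeq_succ h]; rfl
      rw [show pvListA ('o'::t) n
            = PySem.Str.join "" ((PySem.List.pyRange 1 (n + 1) 1).map PySem.Int.toStr)
              :: pvListA t (n + 1) by simp [pvListA]]
      rw [show pvSplitO ('o'::t) = ([], (pvSplitO t).1 :: (pvSplitO t).2) by simp [pvSplitO]]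
      rw [hemit, show pvJ ((p ++ PySem.Int.toStr n) :: pvListA t (n + 1))
            = (p ++ PySem.Int.toStr n).toList ++ pvJ (pvListA t (n + 1)) by simp [pvJ]]
      rw [ih (n + 1) (p ++ PySem.Int.toStr n) (by omega) (by rw [hp, ← pvSeq_succ h])]
      simp [pvJ, pvListB]
    · simp only [pvListA, pvSplitO, if_neg hc]
      rw [show pvJ (String.ofList [c] :: pvListA t n)
            = c :: pvJ (pvListA t n) by simp [pvJ]]
      rw [ih n p h hp]
      simp [pvJ]

-- ===== VERDICT (by name: the statement is the Claim_ definition above) =====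
theorem replaced_string_2_spec : Claim_equal_replaced_string_2 := by
  intro s _
  unfold Spec_replaced_string_2 replaced_string_2 replaced_string_2_alt
  apply String.toList_injective
  simp only [pv_splitOn_eq, List.map_cons, List.drop_succ_cons, List.drop_zero, List.headD_cons]
  rw [pv_foldlA s.toList 1 [], pv_foldlB]
  simp only [List.nil_append, pv_join_toList]
  rw [show pvJ ([String.ofList (pvSplitO s.toList).1] ++ pvListB ((pvSplitO s.toList).2.map String.ofList) 1 "")
        = (pvSplitO s.toList).1 ++ pvJ (pvListB ((pvSplitO s.toList).2.map String.ofList) 1 "") by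
      simp [pvJ]]
  exact pv_glue s.toList 1 "" (by omega)
    (by unfold pvSeq; rw [PySem.List.pyRange_one_eq_nil (by omega)]; rfl)
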